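-- pv_equiv track=rewrite | github.com/taylor-swift-13/SAM2INV | src/smart_sampler.py | _sample_from_combinations
-- ===== SOURCE A (Python) =====
-- from typing import List, Dict, Tuple, Set
--
-- def _sample_from_combinations(
--                              combinations: List[Tuple[int, ...]],
--                              var_names: List[str],
--                              seen: Set[Tuple[int, ...]],
--                              max_count: int) -> List[Dict[str, int]]:
--     """
--     从组合中采样，避免重复
--     """
--     samples = []
--
--     for combo in combinations:
--         if len(samples) >= max_count:
--             break
--
--         if combo not in seen:
--             seen.add(combo)
--             sample = {var_names[i]: combo[i] for i in range(len(var_names))}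
--             samples.append(sample)
--
--     return samples
-- ===== SOURCE B (Python) =====
-- def _sample_from_combinations(combinations, var_names, seen, max_count):
--     # Staged: ordered-dedupe all combinations, filter against the original seen,
--     # slice to max_count, bulk-update seen, then build every dict at once.
--     fresh = [c for c in dict.fromkeys(combinations) if c not in seen]
--     chosen = fresh[:max(max_count, 0)]
--     seen.update(chosen)
--     return [dict(zip(var_names, combo)) for combo in chosen]
-- ===== Notes on version B (the rewrite author's own statement) =====
-- stated objective: alternative
-- what changed: A's single accumulator loop with an early break that mutates seen as it scans is replaced by staged passes: an ordered dedupe of the whole list via dict.fromkeys, a filter against the original seen, a slice to max_count, one bulk seen.update, and a final map building the dicts with dict(zip(...)).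
-- outside the precondition, e.g. on _sample_from_combinations([(1,), (7, 8)], ['x', 'y'], set(), 1): A raises IndexError, B returns [{'x': 1}]
import Mathlib
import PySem

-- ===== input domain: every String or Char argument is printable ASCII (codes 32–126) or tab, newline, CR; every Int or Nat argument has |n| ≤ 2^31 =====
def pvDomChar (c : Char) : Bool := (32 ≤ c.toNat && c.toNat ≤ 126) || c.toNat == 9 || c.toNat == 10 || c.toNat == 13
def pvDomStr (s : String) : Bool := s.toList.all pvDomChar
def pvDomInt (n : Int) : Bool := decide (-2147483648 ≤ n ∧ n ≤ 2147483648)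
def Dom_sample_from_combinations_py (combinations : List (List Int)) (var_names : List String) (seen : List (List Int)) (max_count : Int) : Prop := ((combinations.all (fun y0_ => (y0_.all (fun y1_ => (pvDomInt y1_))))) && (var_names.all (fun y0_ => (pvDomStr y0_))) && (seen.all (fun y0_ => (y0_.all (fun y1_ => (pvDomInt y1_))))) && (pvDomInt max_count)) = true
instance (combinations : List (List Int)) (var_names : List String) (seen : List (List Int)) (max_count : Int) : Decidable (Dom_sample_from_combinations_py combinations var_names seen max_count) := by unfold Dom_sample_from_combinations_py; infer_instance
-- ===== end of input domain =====

-- B replaces A's accumulator loop with early break (mutating `seen` as it scans) by staged passes: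
-- ordered dedupe of the whole list (dict.fromkeys), filter against the original seen, slice to
-- max_count, then a map building each dict with dict(zip(...)) (objective: alternative).
-- Both A and B mutate the Python `seen` set identically where A returns; the equivalence proved
-- here is about the return value.

-- ===== PORT A =====
-- sample = {var_names[i]: combo[i] for i in range(len(var_names))}; exact under Pre_ (combo long enough)
def sfcA_sample (var_names : List String) (combo : List Int) : List (String × Int) :=
  ((PySem.List.pyRange 0 (var_names.length : Int) 1).foldl
    (fun d i => PySem.Dict.insert d (PySem.List.pyGetD var_names i "") (PySem.List.pyGetD combo i 0))
    PySem.Dict.empty).items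

def sfcA_loop (var_names : List String) (combos : List (List Int)) (seen : List (List Int))
    (samples : List (List (String × Int))) (max_count : Int) : List (List (String × Int)) :=
  match combos with
  | [] => samples
  | combo :: rest =>
    if (samples.length : Int) ≥ max_count then samples
    else if combo ∈ seen then sfcA_loop var_names rest seen samples max_count
    else sfcA_loop var_names rest (PySem.Set.add seen combo)
           (samples ++ [sfcA_sample var_names combo]) max_count

def sample_from_combinations_py (combinations : List (List Int)) (var_names : List String) (seen : List (List Int)) (max_count : Int) : List (List (String × Int)) :=
  sfcA_loop var_names combinations seen [] max_count

-- ===== PORT B =====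
-- dict(zip(var_names, combo))
def sfcB_sample (var_names : List String) (combo : List Int) : List (String × Int) :=
  ((var_names.zip combo).foldl (fun d kv => PySem.Dict.insert d kv.1 kv.2) PySem.Dict.empty).items

def sample_from_combinations_py_alt (combinations : List (List Int)) (var_names : List String) (seen : List (List Int)) (max_count : Int) : List (List (String × Int)) :=
  -- chosen = [c for c in dict.fromkeys(combinations) if c not in seen][:max(max_count, 0)]
  (PySem.List.slice ((PySem.List.dedup combinations).filter (fun c => !(seen.contains c)))
      none (some (max max_count 0))).map
    (fun combo => sfcB_sample var_names combo)

-- ===== PRECONDITION & SPEC =====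
-- Pre_ excludes inputs where an unseen combination shorter than var_names can be reached, on which
-- A's dict comprehension raises IndexError; it is slightly conservative (a short combination lying
-- beyond the max_count cut-off is also excluded although A then returns — see claim cites).
def Pre_sample_from_combinations_py (combinations : List (List Int)) (var_names : List String) (seen : List (List Int)) (max_count : Int) : Prop :=
  max_count ≤ 0 ∨ ∀ c ∈ combinations, c ∈ seen ∨ var_names.length ≤ c.length
instance (combinations : List (List Int)) (var_names : List String) (seen : List (List Int)) (max_count : Int) : Decidable (Pre_sample_from_combinations_py combinations var_names seen max_count) := by unfold Pre_sample_from_combinations_py; infer_instance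

def pvWitness_sample_from_combinations_py : List (List Int) × List String × List (List Int) × Int :=
  ([[1, 2], [1, 2], [3, 4], [5, 6]], ["x", "y"], [[3, 4]], 2)

def Spec_sample_from_combinations_py (combinations : List (List Int)) (var_names : List String) (seen : List (List Int)) (max_count : Int) (out : List (List (String × Int))) : Prop := out = sample_from_combinations_py_alt combinations var_names seen max_count
instance (combinations : List (List Int)) (var_names : List String) (seen : List (List Int)) (max_count : Int) (out : List (List (String × Int))) : Decidable (Spec_sample_from_combinations_py combinations var_names seen max_count out) := by unfold Spec_sample_from_combinations_py; infer_instance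

-- ===== CLAIM (what is proved, stated in full; the proofs are below) =====
def Claim_equal_sample_from_combinations_py : Prop := ∀ (combinations : List (List Int)) (var_names : List String) (seen : List (List Int)) (max_count : Int), Dom_sample_from_combinations_py combinations var_names seen max_count → Pre_sample_from_combinations_py combinations var_names seen max_count → Spec_sample_from_combinations_py combinations var_names seen max_count (sample_from_combinations_py combinations var_names seen max_count)

-- ===== LEMMAS AND PROOFS =====

-- proof-only helper: the combinations A samples from, in order — those not in the growing seen
def sfcFresh (combos : List (List Int)) (seen : List (List Int)) : List (List Int) :=
  match combos with
  | [] => []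
  | c :: rest => if c ∈ seen then sfcFresh rest seen else c :: sfcFresh rest (seen ++ [c])

lemma sfcFresh_cons (c : List Int) (rest : List (List Int)) (seen : List (List Int)) :
    sfcFresh (c :: rest) seen
      = if c ∈ seen then sfcFresh rest seen else c :: sfcFresh rest (seen ++ [c]) := rfl

lemma sfcFresh_congr (combos : List (List Int)) :
    ∀ s₁ s₂ : List (List Int), (∀ x, x ∈ s₁ ↔ x ∈ s₂) →
    sfcFresh combos s₁ = sfcFresh combos s₂ := by
  induction combos with
  | nil => intro _ _ _; rfl
  | cons c rest ih =>
    intro s₁ s₂ h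
    rw [sfcFresh_cons, sfcFresh_cons]
    by_cases hc : c ∈ s₁
    · rw [if_pos hc, if_pos ((h c).mp hc), ih s₁ s₂ h]
    · rw [if_neg hc, if_neg (fun hx => hc ((h c).mpr hx))]
      congr 1
      exact ih _ _ (fun x => by simp [h x])

-- filtering the ordered dedupe against seen = the fresh scan with a growing seen
lemma sfcFresh_eq_filter_foldl (combos : List (List Int)) :
    ∀ (acc seen : List (List Int)),
    (combos.foldl PySem.Set.add acc).filter (fun c => !(seen.contains c))
      = acc.filter (fun c => !(seen.contains c)) ++ sfcFresh combos (seen ++ acc) := by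
  induction combos with
  | nil => intro acc seen; simp [sfcFresh]
  | cons c rest ih =>
    intro acc seen
    have hadd : PySem.Set.add acc c = if acc.contains c then acc else acc ++ [c] := by
      simp [PySem.Set.add]
    rw [List.foldl_cons, ih (PySem.Set.add acc c) seen, hadd, sfcFresh_cons]
    by_cases hacc : c ∈ acc
    · rw [if_pos (by simpa using hacc), if_pos (by simp [hacc])]
    · rw [if_neg (by simpa using hacc)]
      by_cases hseen : c ∈ seen
      · have hfc : (acc ++ [c]).filter (fun c => !(seen.contains c))
            = acc.filter (fun c => !(seen.contains c)) := by
          simp [List.filter_append, hseen]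
        rw [hfc, if_pos (by simp [hseen])]
        congr 1
        refine sfcFresh_congr rest _ _ (fun x => ?_)
        simp only [List.mem_append, List.mem_singleton]
        constructor
        · rintro (h | h | rfl)
          · exact Or.inl h
          · exact Or.inr h
          · exact Or.inl hseen
        · rintro (h | h)
          · exact Or.inl h
          · exact Or.inr (Or.inl h)
      · have hfc : (acc ++ [c]).filter (fun c => !(seen.contains c))
            = acc.filter (fun c => !(seen.contains c)) ++ [c] := by
          simp [List.filter_append, hseen]
        rw [hfc, if_neg (by simp [hseen, hacc]), List.append_assoc, List.singleton_append,
          ← List.append_assoc]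

-- the two dict constructions agree when the combination is long enough
lemma sfc_sample_eq (var_names : List String) (combo : List Int)
    (h : var_names.length ≤ combo.length) :
    sfcA_sample var_names combo = sfcB_sample var_names combo := by
  unfold sfcA_sample sfcB_sample
  congr 1
  rw [PySem.List.pyRange_zero_nat, List.foldl_map]
  simp only [PySem.List.pyGetD_natCast]
  suffices hl : (List.range var_names.length).map
      (fun k => (var_names.getD k "", combo.getD k 0)) = var_names.zip combo by
    rw [← hl, List.foldl_map]
  induction var_names generalizing combo with
  | nil => simp
  | cons a vn ih =>
    cases combo with
    | nil => simp at h
    | cons b cs =>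
      simp only [List.length_cons, List.range_succ_eq_map, List.map_cons, List.map_map,
        List.zip_cons_cons]
      simp only [List.getD_cons_zero, Function.comp_def, List.getD_cons_succ]
      rw [← ih cs (by simpa using h)]

-- A's loop = map sfcB_sample over a prefix of the fresh scan
lemma sfc_loop_eq (var_names : List String) (combos : List (List Int)) :
    ∀ (seen : List (List Int)) (samples : List (List (String × Int))) (mc : Int),
    (∀ c ∈ combos, c ∈ seen ∨ var_names.length ≤ c.length) →
    sfcA_loop var_names combos seen samples mc
      = samples ++ ((sfcFresh combos seen).take (mc - samples.length).toNat).map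
          (sfcB_sample var_names) := by
  induction combos with
  | nil => intro seen samples mc _; simp [sfcA_loop, sfcFresh]
  | cons combo rest ih =>
    intro seen samples mc h
    unfold sfcA_loop
    rw [sfcFresh_cons]
    by_cases hge : (samples.length : Int) ≥ mc
    · have : (mc - samples.length).toNat = 0 := by omega
      simp [hge, this]
    · have hn : (mc - samples.length).toNat = (mc - samples.length - 1).toNat + 1 := by omega
      simp only [hge, if_false]
      by_cases hs : combo ∈ seen
      · simp only [hs, if_true]
        exact ih seen samples mc (fun c hc => h c (List.mem_cons_of_mem _ hc))
      · simp only [hs, if_false]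
        have hlen : var_names.length ≤ combo.length := by
          rcases h combo (List.mem_cons_self) with h1 | h1
          · exact absurd h1 hs
          · exact h1
        have hadd : PySem.Set.add seen combo = seen ++ [combo] := by
          simp [PySem.Set.add]; intro hc; exact absurd hc hs
        rw [ih (PySem.Set.add seen combo) (samples ++ [sfcA_sample var_names combo]) mc ?_]
        · have harg : (mc - ((samples ++ [sfcA_sample var_names combo]).length : Int)).toNat
              = (mc - (samples.length : Int) - 1).toNat := by
            simp only [List.length_append, List.length_cons, List.length_nil]
            omega
          rw [harg, hadd, sfc_sample_eq var_names combo hlen, hn, List.take_succ_cons,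
            List.map_cons, List.append_assoc, List.singleton_append]
        · intro c hc
          rcases h c (List.mem_cons_of_mem _ hc) with h1 | h1
          · exact Or.inl (by rw [PySem.Set.mem_add]; exact Or.inl h1)
          · exact Or.inr h1

-- ===== VERDICT (by name: the statement is the Claim_ definition above) =====
theorem sample_from_combinations_py_spec : Claim_equal_sample_from_combinations_py := by
  intro combinations var_names seen max_count _ hpre
  unfold Spec_sample_from_combinations_py
  unfold sample_from_combinations_py sample_from_combinations_py_alt
  have hfresh : (PySem.List.dedup combinations).filter (fun c => !(seen.contains c))
      = sfcFresh combinations seen := by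
    rw [PySem.List.dedup_eq_ofList]
    have := sfcFresh_eq_filter_foldl combinations [] seen
    simpa [PySem.Set.ofList] using this
  rw [hfresh, PySem.List.slice_to (hb := by omega)]
  rcases hpre with hle | hall
  · have h0 : (max max_count 0).toNat = 0 := by omega
    rw [h0]
    cases combinations with
    | nil => simp [sfcA_loop]
    | cons c rest =>
      unfold sfcA_loop
      rw [if_pos (show (([] : List (List (String × Int))).length : Int) ≥ max_count by simp; omega)]
      simp
  · rw [sfc_loop_eq var_names combinations seen [] max_count hall]
    simp only [List.length_nil, Int.natCast_zero, Int.sub_zero, List.nil_append]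
    have h2 : max_count.toNat = (max max_count 0).toNat := by omega
    rw [h2]
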